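-- pv_equiv track=rewrite | github.com/katiejones404/2026-NVIDIA-MIT-iQuHack | team-submissions/.ipynb_checkpoints/symValidator-checkpoint.py | dihedral_orbit
-- ===== SOURCE A (Python) =====
-- def dihedral_orbit(s):
--     #the 'shape' is a 1D sequence, so we can't use  rotations
--     s = list(s)
--     ops = [
--         lambda x: x,
--         lambda x: [-a for a in x],             # flip
--         lambda x: list(reversed(x)),           # reverse
--         lambda x: [-a for a in reversed(x)]    # flip+reverse
--     ]
--     return {tuple(op(s)) for op in ops}
-- ===== SOURCE B (Python) =====
-- def dihedral_orbit(s):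
--     # Fixpoint closure over the two generators (negate, reverse) with a worklist,
--     # instead of listing the four group elements explicitly.
--     def negate(x):
--         return tuple(-a for a in x)
--
--     def rev(x):
--         return x[::-1]
--
--     start = tuple(s)
--     orbit = {start}
--     work = [start]
--     while work:
--         x = work.pop(0)
--         for g in (negate, rev):
--             y = g(x)
--             if y not in orbit:
--                 orbit.add(y)
--                 work.append(y)
--     return orbit
-- ===== Notes on version B (the rewrite author's own statement) =====
-- stated objective: alternative
-- what changed: B computes the orbit as a worklist fixpoint closure under the two generators negate and reverse, instead of applying a hard-coded list of the four group elements.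
import Mathlib
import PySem

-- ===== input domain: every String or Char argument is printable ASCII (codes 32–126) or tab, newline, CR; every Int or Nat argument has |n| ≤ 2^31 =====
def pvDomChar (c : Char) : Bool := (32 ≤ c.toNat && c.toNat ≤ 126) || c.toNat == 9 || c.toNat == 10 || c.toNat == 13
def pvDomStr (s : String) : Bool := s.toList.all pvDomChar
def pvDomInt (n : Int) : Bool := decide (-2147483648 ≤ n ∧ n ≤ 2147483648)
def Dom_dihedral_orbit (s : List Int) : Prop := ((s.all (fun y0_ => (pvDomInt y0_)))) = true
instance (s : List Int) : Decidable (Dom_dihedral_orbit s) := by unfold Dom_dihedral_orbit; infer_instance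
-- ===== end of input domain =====

-- B computes the orbit as a worklist fixpoint closure under the two generators
-- negate/reverse instead of applying A's hard-coded list of four transforms (alternative).


-- ===== PORT A =====
-- A applies its four ops in order; the Python set comprehension is PySem.Set.ofList
-- (first occurrences, in order) of the four results.
def dihedral_orbit (s : List Int) : List (List Int) :=
  PySem.Set.ofList
    [s,
     s.map (fun a => -a),
     s.reverse,
     (s.reverse).map (fun a => -a)]

-- ===== PORT B =====
def bNegate (x : List Int) : List Int := x.map (fun a => -a)

def bRev (x : List Int) : List Int := x.reverse

-- Source B's `while work:` loop: pop the front of the worklist, apply both generators,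
-- enqueue anything new; the fuel is only a totality guard (the loop pops each orbit
-- element once and the orbit never exceeds 4 elements, so 9 is never exhausted)
def bOrbitLoop : Nat → PySem.Set (List Int) → List (List Int) → PySem.Set (List Int)
  | 0, orbit, _ => orbit
  | _ + 1, orbit, [] => orbit
  | fuel + 1, orbit, x :: work =>
      let y1 := bNegate x
      let orbit1 := PySem.Set.add orbit y1
      let work1 := if PySem.Set.contains orbit y1 then work else work ++ [y1]
      let y2 := bRev x
      let orbit2 := PySem.Set.add orbit1 y2
      let work2 := if PySem.Set.contains orbit1 y2 then work1 else work1 ++ [y2]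
      bOrbitLoop fuel orbit2 work2

def dihedral_orbit_alt (s : List Int) : List (List Int) :=
  bOrbitLoop 9 (PySem.Set.ofList [s]) [s]

-- ===== PRECONDITION & SPEC =====
def Spec_dihedral_orbit (s : List Int) (out : List (List Int)) : Prop := out = dihedral_orbit_alt s
instance (s : List Int) (out : List (List Int)) : Decidable (Spec_dihedral_orbit s out) := by unfold Spec_dihedral_orbit; infer_instance

-- ===== CLAIM (what is proved, stated in full; the proofs are below) =====
def Claim_equal_dihedral_orbit : Prop := ∀ (s : List Int), Dom_dihedral_orbit s → Spec_dihedral_orbit s (dihedral_orbit s)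

-- ===== LEMMAS AND PROOFS =====

theorem neg_neg_list (x : List Int) : (x.map (fun a => -a)).map (fun a => -a) = x := by
  simp [List.map_map]

-- the closure loop, stated abstractly: if {s, n, r, nr} is closed under the two
-- generators as the dihedral multiplication table says, B's worklist loop returns
-- exactly the first-occurrence dedup of [s, n, r, nr] (A's set-comprehension order)
theorem bOrbitLoop_key (s n r nr : List Int)
    (hfs : bNegate s = n) (hgs : bRev s = r) (hfn : bNegate n = s) (hgn : bRev n = nr)
    (hfr : bNegate r = nr) (hgr : bRev r = s) (hfnr : bNegate nr = r) (hgnr : bRev nr = n) :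
    bOrbitLoop 9 (PySem.Set.ofList [s]) [s] = PySem.Set.ofList [s, n, r, nr] := by
  by_cases h1 : n = s
  · have h2 : nr = r := by rw [← hgn, h1, hgs]
    by_cases h3 : r = s <;>
      simp [bOrbitLoop, PySem.Set.ofList, PySem.Set.add, PySem.Set.contains,
        hfs, hgs, hfr, hgr, h1, h2, h3]
  · by_cases h3 : r = s
    · have h2 : nr = n := by rw [← hfr, h3, hfs]
      simp [bOrbitLoop, PySem.Set.ofList, PySem.Set.add, PySem.Set.contains,
        hfs, hgs, hfn, hgn, h1, h2, h3]
    · by_cases h4 : r = n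
      · have h2 : nr = s := by rw [← hfr, h4, hfn]
        simp [bOrbitLoop, PySem.Set.ofList, PySem.Set.add, PySem.Set.contains,
          hfs, hgs, hfn, hgn, h1, h2, h4]
      · have d1 : nr ≠ s := fun h => h4 (by rw [← hfnr, h, hfs])
        have d2 : nr ≠ n := fun h => h3 (by rw [← hfnr, h, hfn])
        have d3 : nr ≠ r := fun h => h1 (by rw [← hgnr, h, hgr])
        simp [bOrbitLoop, PySem.Set.ofList, PySem.Set.add, PySem.Set.contains,
          hfs, hgs, hfn, hgn, hfr, hgr, hfnr, hgnr, h1, h3, h4, d1, d2, d3]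

theorem dihedral_orbit_eq_alt (s : List Int) : dihedral_orbit s = dihedral_orbit_alt s := by
  unfold dihedral_orbit dihedral_orbit_alt
  refine (bOrbitLoop_key s (s.map (fun a => -a)) s.reverse ((s.reverse).map (fun a => -a))
    rfl rfl ?_ ?_ rfl ?_ ?_ ?_).symm
  · exact neg_neg_list s
  · simp [bRev]
  · simp [bRev]
  · exact neg_neg_list s.reverse
  · simp [bRev]

-- ===== VERDICT (by name: the statement is the Claim_ definition above) =====
theorem dihedral_orbit_spec : Claim_equal_dihedral_orbit := by
  intro s _
  exact dihedral_orbit_eq_alt s
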